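-- pv_equiv track=rewrite | github.com/Nadia-Mas/LeetCode_Solutions | Array101/2231. Largest Number After Digit Swaps by Parity/2231. Largest Number After Digit Swaps by Parity.py | largestInteger
-- ===== SOURCE A (Python) =====
-- def largestInteger(num: int) -> int:
--     #Approach 01
--    # nums= str(num)
--     n = len(str(num))
--     digit_list = [int(i) for i in str(num)]
--
--     odds=[]
--     evens=[]
--
--     for i in digit_list:
--         if i%2 == 0:
--             evens.append(i)
--         else:
--             odds.append(i)
--
--     odds.sort()
--     evens.sort()
--
--     ans = [odds.pop() if digit_list[d]%2 else evens.pop() for d in range(n)]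
--     return (sum([d*10**(len(ans)-i-1) for i,d in enumerate(ans)]))
-- ===== SOURCE B (Python) =====
-- def largestInteger(num: int) -> int:
--     digits = [int(c) for c in str(num)]
--     rest = list(digits)
--     val = 0
--     for d in digits:
--         best = max([x for x in rest if x % 2 == d % 2])
--         rest.remove(best)
--         val = val * 10 + best
--     return val
-- ===== Notes on version B (the rewrite author's own statement) =====
-- stated objective: simpler
-- what changed: Replaces the parity-split/sort/pop pipeline plus positional power sum by repeated selection: for each position take the max same-parity digit remaining in one unsorted list and accumulate the result Horner-style.
import Mathlib
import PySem

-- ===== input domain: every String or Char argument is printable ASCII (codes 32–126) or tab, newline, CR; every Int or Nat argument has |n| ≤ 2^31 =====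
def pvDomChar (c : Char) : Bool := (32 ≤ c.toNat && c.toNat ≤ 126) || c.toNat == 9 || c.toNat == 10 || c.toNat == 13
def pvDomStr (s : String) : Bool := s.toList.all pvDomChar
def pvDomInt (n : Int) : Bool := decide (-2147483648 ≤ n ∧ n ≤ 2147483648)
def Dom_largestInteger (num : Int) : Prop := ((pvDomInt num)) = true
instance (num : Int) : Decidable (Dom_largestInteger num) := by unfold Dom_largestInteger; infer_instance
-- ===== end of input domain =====

-- B replaces A's parity-split/sort/pop pipeline and positional power sum by repeated
-- max-selection from one unsorted list with Horner accumulation (objective: simpler).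

-- ===== PORT A =====
-- int(c) for a one-character string c (A's and B's comprehensions both do this)
def pyDigit (c : Char) : Int := (PySem.Int.ofChars? [c]).getD 0

-- the evens/odds append loop
def aSplit (p : List Int × List Int) (i : Int) : List Int × List Int :=
  if PySem.Int.mod i 2 = 0 then (p.1 ++ [i], p.2) else (p.1, p.2 ++ [i])

-- one step of A's comprehension: state = (odds, evens, ans); x = digit_list[d]
def aStep (st : List Int × List Int × List Int) (x : Int) : List Int × List Int × List Int :=
  if PySem.Int.mod x 2 ≠ 0 then
    match PySem.List.pop? st.1 with
    | some (v, r) => (r, st.2.1, st.2.2 ++ [v])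
    | none => (st.1, st.2.1, st.2.2)   -- Python raises IndexError here; unreachable (counts match)
  else
    match PySem.List.pop? st.2.1 with
    | some (v, r) => (st.1, r, st.2.2 ++ [v])
    | none => st

def largestInteger (num : Int) : Int :=
  let n : Int := PySem.Str.len (PySem.Int.toStr num)
  let digit_list : List Int := (PySem.Int.toStr num).toList.map pyDigit
  let oe := digit_list.foldl aSplit ([], [])
  let odds := PySem.List.sorted oe.2 (fun x => x) false
  let evens := PySem.List.sorted oe.1 (fun x => x) false
  let st := (PySem.List.pyRange 0 n).foldl
      (fun st d => aStep st (PySem.List.pyGetD digit_list d 0)) (odds, evens, [])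
  let ans := st.2.2
  -- 10**k ported as 10 ^ k.toNat: the exponent len(ans)-i-1 is ≥ 0 for every enumerate index
  ((PySem.List.enumerate ans 0).map
      (fun p => p.2 * 10 ^ ((ans.length : Int) - p.1 - 1).toNat)).sum

-- ===== PORT B =====
-- one step of B's loop: state = (rest, val); d = current digit
def bStep (st : List Int × Int) (d : Int) : List Int × Int :=
  match PySem.List.max?
      (st.1.filter (fun x => PySem.Int.mod x 2 == PySem.Int.mod d 2)) (fun x => x) with
  | some best =>
    match PySem.List.remove? st.1 best with
    | some r => (r, st.2 * 10 + best)
    | none => (st.1, st.2 * 10 + best)   -- unreachable: best is an element of st.1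
  | none => st   -- Python: max([]) raises ValueError; unreachable (a same-parity digit remains)

def largestInteger_alt (num : Int) : Int :=
  let digits : List Int := (PySem.Int.toStr num).toList.map pyDigit
  (digits.foldl bStep (digits, 0)).2

-- ===== PRECONDITION & SPEC =====
-- Pre_ admits exactly the nonnegative num: on a negative num, str(num) contains the minus sign
-- and int of that one-character string raises ValueError in A (and likewise in B).
def Pre_largestInteger (num : Int) : Prop := 0 ≤ num
instance (num : Int) : Decidable (Pre_largestInteger num) := by unfold Pre_largestInteger; infer_instance
def pvWitness_largestInteger : Int := (1234)

def Spec_largestInteger (num : Int) (out : Int) : Prop := out = largestInteger_alt num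
instance (num : Int) (out : Int) : Decidable (Spec_largestInteger num out) := by unfold Spec_largestInteger; infer_instance

-- ===== CLAIM (what is proved, stated in full; the proofs are below) =====
def Claim_equal_largestInteger : Prop := ∀ (num : Int), Dom_largestInteger num → Pre_largestInteger num → Spec_largestInteger num (largestInteger num)

-- ===== LEMMAS AND PROOFS =====

-- the value of `d % 2` in Python is 0 or 1
theorem mod2_cases (d : Int) : PySem.Int.mod d 2 = 0 ∨ PySem.Int.mod d 2 = 1 := by
  have h1 := PySem.Int.mod_nonneg d (b := 2) (by norm_num)
  have h2 := PySem.Int.mod_lt d (b := 2) (by norm_num)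
  omega

-- the evens/odds loop computes the two parity filters
theorem aSplit_eq (l : List Int) : ∀ (a b : List Int),
    l.foldl aSplit (a, b) =
      (a ++ l.filter (fun i => decide (PySem.Int.mod i 2 = 0)),
       b ++ l.filter (fun i => !decide (PySem.Int.mod i 2 = 0))) := by
  induction l with
  | nil => intro a b; simp
  | cons x t ih =>
    intro a b
    rw [List.foldl_cons, List.filter_cons, List.filter_cons]
    by_cases hx : PySem.Int.mod x 2 = 0
    · have h1 : aSplit (a, b) x = (a ++ [x], b) := by
        unfold aSplit; rw [if_pos hx]
      rw [h1, ih, decide_eq_true hx]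
      simp
    · have h1 : aSplit (a, b) x = (a, b ++ [x]) := by
        unfold aSplit; rw [if_neg hx]
      rw [h1, ih, decide_eq_false hx]
      simp

-- A's comprehension with the accumulator split off
def ansL : List Int → List Int → List Int → List Int
  | [], _, _ => []
  | x :: ds, o, e =>
    if PySem.Int.mod x 2 ≠ 0 then
      match PySem.List.pop? o with
      | some (v, r) => v :: ansL ds r e
      | none => ansL ds o e
    else
      match PySem.List.pop? e with
      | some (v, r) => v :: ansL ds o r
      | none => ansL ds o e

theorem aFold_acc (ds : List Int) : ∀ (o e acc : List Int),
    (ds.foldl aStep (o, e, acc)).2.2 = acc ++ ansL ds o e := by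
  induction ds with
  | nil => intro o e acc; simp [ansL]
  | cons x t ih =>
    intro o e acc
    rw [List.foldl_cons]
    by_cases hx : PySem.Int.mod x 2 ≠ 0
    · rcases hp : PySem.List.pop? o with _ | ⟨v, r⟩
      · have hA : aStep (o, e, acc) x = (o, e, acc) := by
          unfold aStep; rw [if_pos hx, hp]
        have hB : ansL (x :: t) o e = ansL t o e := by
          simp only [ansL]; rw [if_pos hx, hp]
        rw [hA, hB, ih]
      · have hA : aStep (o, e, acc) x = (r, e, acc ++ [v]) := by
          unfold aStep; rw [if_pos hx, hp]
        have hB : ansL (x :: t) o e = v :: ansL t r e := by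
          simp only [ansL]; rw [if_pos hx, hp]
        rw [hA, hB, ih, List.append_assoc]
        rfl
    · rcases hp : PySem.List.pop? e with _ | ⟨v, r⟩
      · have hA : aStep (o, e, acc) x = (o, e, acc) := by
          unfold aStep; rw [if_neg hx, hp]
        have hB : ansL (x :: t) o e = ansL t o e := by
          simp only [ansL]; rw [if_neg hx, hp]
        rw [hA, hB, ih]
      · have hA : aStep (o, e, acc) x = (o, r, acc ++ [v]) := by
          unfold aStep; rw [if_neg hx, hp]
        have hB : ansL (x :: t) o e = v :: ansL t o r := by
          simp only [ansL]; rw [if_neg hx, hp]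
        rw [hA, hB, ih, List.append_assoc]
        rfl

-- Horner evaluation and A's positional power sum
def horner (l : List Int) (v : Int) : Int := l.foldl (fun a d => a * 10 + d) v

theorem enumerate_shift (l : List Int) : ∀ (s : Int),
    PySem.List.enumerate l (s + 1) = (PySem.List.enumerate l s).map (fun p => (p.1 + 1, p.2)) := by
  induction l with
  | nil => intro s; simp [PySem.List.enumerate_nil]
  | cons x t ih => intro s; simp [PySem.List.enumerate_cons, ih (s + 1), ih s]

def powSum (l : List Int) : Int :=
  ((PySem.List.enumerate l 0).map
      (fun p => p.2 * 10 ^ ((l.length : Int) - p.1 - 1).toNat)).sum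

theorem powSum_cons (d : Int) (t : List Int) :
    powSum (d :: t) = d * 10 ^ t.length + powSum t := by
  unfold powSum
  rw [PySem.List.enumerate_cons, show (0 : Int) + 1 = 0 + 1 from rfl, enumerate_shift,
    List.map_cons, List.sum_cons, List.map_map]
  simp only [List.length_cons]
  congr 1
  · congr 2
    omega
  · refine congrArg List.sum (List.map_congr_left ?_)
    intro p hp
    rcases (PySem.List.mem_enumerate_iff _ _ _).mp hp with ⟨k, hk, rfl⟩
    simp only [Function.comp]
    congr 3
    omega

theorem horner_eq (l : List Int) : ∀ v, horner l v = v * 10 ^ l.length + powSum l := by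
  induction l with
  | nil => intro v; simp [horner, powSum, PySem.List.enumerate_nil]
  | cons d t ih =>
    intro v
    have h : horner (d :: t) v = horner t (v * 10 + d) := rfl
    rw [h, ih, powSum_cons]
    simp only [List.length_cons, pow_succ]
    ring

theorem powSum_eq_horner (l : List Int) : powSum l = horner l 0 := by
  rw [horner_eq]; simp

-- main loop correspondence: B's selection loop computes the Horner value of A's answer list
theorem main_loop (ds : List Int) : ∀ (o e rest : List Int) (v : Int),
    rest.Perm (o ++ e) →
    o.Pairwise (· ≤ ·) → e.Pairwise (· ≤ ·) →
    (∀ x ∈ o, PySem.Int.mod x 2 = 1) → (∀ x ∈ e, PySem.Int.mod x 2 = 0) →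
    ds.countP (fun d => !decide (PySem.Int.mod d 2 = 0)) ≤ o.length →
    ds.countP (fun d => decide (PySem.Int.mod d 2 = 0)) ≤ e.length →
    (ds.foldl bStep (rest, v)).2 = horner (ansL ds o e) v := by
  induction ds with
  | nil =>
    intro o e rest v _ _ _ _ _ _ _
    simp [ansL, horner]
  | cons d t ih =>
    intro o e rest v hperm hpo hpe hmo hme hco hce
    rw [List.countP_cons] at hco hce
    rw [List.foldl_cons]
    rcases mod2_cases d with hd | hd
    · -- d is even: A pops the last of evens; B selects the max even digit
      have hcnt : t.countP (fun x => decide (PySem.Int.mod x 2 = 0)) + 1 ≤ e.length := by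
        rw [decide_eq_true hd] at hce; simpa using hce
      have hcnt' : t.countP (fun x => !decide (PySem.Int.mod x 2 = 0)) ≤ o.length := by
        rw [decide_eq_true hd] at hco; simpa using hco
      rcases e.eq_nil_or_concat with rfl | ⟨e', b, rfl⟩
      · simp at hcnt
      simp only [List.concat_eq_append] at hperm hpe hme hcnt hce ⊢
      have hx : ¬ PySem.Int.mod d 2 ≠ 0 := by omega
      have hpop : PySem.List.pop? (e' ++ [b]) = some (b, e') := PySem.List.pop?_last e' b
      have hB : ansL (d :: t) o (e' ++ [b]) = b :: ansL t o e' := by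
        simp only [ansL]; rw [if_neg hx, hpop]
      -- B's step
      have hmb : PySem.Int.mod b 2 = 0 := hme b (by simp)
      have hfil : (rest.filter (fun x => PySem.Int.mod x 2 == PySem.Int.mod d 2)).Perm (e' ++ [b]) := by
        have h1 := hperm.filter (fun x => PySem.Int.mod x 2 == PySem.Int.mod d 2)
        rw [List.filter_append] at h1
        have h2 : (o.filter (fun x => PySem.Int.mod x 2 == PySem.Int.mod d 2)) = [] := by
          rw [List.filter_eq_nil_iff]
          intro x hxo
          have hx1 := hmo x hxo
          simp only [hx1, hd]
          decide
        have h3 : ((e' ++ [b]).filter (fun x => PySem.Int.mod x 2 == PySem.Int.mod d 2)) = e' ++ [b] := by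
          rw [List.filter_eq_self]
          intro x hxe
          have hx1 := hme x hxe
          simp only [hx1, hd]
          decide
        rw [h2, h3] at h1
        simpa using h1
      have hbmem : b ∈ rest.filter (fun x => PySem.Int.mod x 2 == PySem.Int.mod d 2) :=
        (hfil.mem_iff).mpr (by simp)
      obtain ⟨m, hm⟩ : ∃ m, PySem.List.max?
          (rest.filter (fun x => PySem.Int.mod x 2 == PySem.Int.mod d 2)) (fun x => x) = some m := by
        cases h : PySem.List.max?
            (rest.filter (fun x => PySem.Int.mod x 2 == PySem.Int.mod d 2)) (fun x => x) with
        | none =>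
          exact absurd ((PySem.List.max?_eq_none_iff _ _).mp h ▸ hbmem) (by simp)
        | some m => exact ⟨m, rfl⟩
      have hmmem : m ∈ e' ++ [b] := hfil.subset (PySem.List.max?_mem hm)
      have hmle : m ≤ b := by
        rcases List.mem_append.mp hmmem with h | h
        · exact (List.pairwise_append.mp hpe).2.2 m h b (by simp)
        · simp at h; omega
      have hble : b ≤ m := PySem.List.max?_isMax hm b hbmem
      have hmeq : m = b := le_antisymm hmle hble
      subst hmeq
      have hbrest : m ∈ rest := hperm.mem_iff.mpr (by simp)
      have hrm : PySem.List.remove? rest m = some (rest.erase m) :=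
        PySem.List.remove?_eq_some_erase rest m hbrest
      have hstep : bStep (rest, v) d = (rest.erase m, v * 10 + m) := by
        simp only [bStep, hm, hrm]
      rw [hstep, hB]
      have hperm' : (rest.erase m).Perm (o ++ e') := by
        have h1 : rest.Perm (m :: (o ++ e')) := by
          refine hperm.trans ?_
          have h0 : o ++ (e' ++ [m]) = (o ++ e') ++ [m] := by rw [List.append_assoc]
          rw [h0]
          simpa using (List.perm_middle (a := m) (l₁ := o ++ e') (l₂ := ([] : List Int)))
        have h2 := h1.erase m
        simpa using h2
      have hpe' : e'.Pairwise (· ≤ ·) := hpe.sublist (by simp)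
      have hme' : ∀ x ∈ e', PySem.Int.mod x 2 = 0 := fun x hx' => hme x (by simp [hx'])
      have := ih o e' (rest.erase m) (v * 10 + m) hperm' hpo hpe' hmo hme'
        hcnt' (by simp [List.length_append] at hcnt ⊢; omega)
      rw [this]
      rfl
    · -- d is odd: A pops the last of odds; B selects the max odd digit
      have hcnt : t.countP (fun x => !decide (PySem.Int.mod x 2 = 0)) + 1 ≤ o.length := by
        have hdd : decide (PySem.Int.mod d 2 = 0) = false := by
          rw [decide_eq_false]; omega
        rw [hdd] at hco; simpa using hco
      have hcnt' : t.countP (fun x => decide (PySem.Int.mod x 2 = 0)) ≤ e.length := by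
        have hdd : decide (PySem.Int.mod d 2 = 0) = false := by
          rw [decide_eq_false]; omega
        rw [hdd] at hce; simpa using hce
      rcases o.eq_nil_or_concat with rfl | ⟨o', b, rfl⟩
      · simp at hcnt
      simp only [List.concat_eq_append] at hperm hpo hmo hcnt hco ⊢
      have hx : PySem.Int.mod d 2 ≠ 0 := by omega
      have hpop : PySem.List.pop? (o' ++ [b]) = some (b, o') := PySem.List.pop?_last o' b
      have hB : ansL (d :: t) (o' ++ [b]) e = b :: ansL t o' e := by
        simp only [ansL]; rw [if_pos hx, hpop]
      have hmb : PySem.Int.mod b 2 = 1 := hmo b (by simp)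
      have hfil : (rest.filter (fun x => PySem.Int.mod x 2 == PySem.Int.mod d 2)).Perm (o' ++ [b]) := by
        have h1 := hperm.filter (fun x => PySem.Int.mod x 2 == PySem.Int.mod d 2)
        rw [List.filter_append] at h1
        have h2 : (e.filter (fun x => PySem.Int.mod x 2 == PySem.Int.mod d 2)) = [] := by
          rw [List.filter_eq_nil_iff]
          intro x hxe
          have hx1 := hme x hxe
          simp only [hx1, hd]
          decide
        have h3 : ((o' ++ [b]).filter (fun x => PySem.Int.mod x 2 == PySem.Int.mod d 2)) = o' ++ [b] := by
          rw [List.filter_eq_self]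
          intro x hxo
          have hx1 := hmo x hxo
          simp only [hx1, hd]
          decide
        rw [h2, h3] at h1
        simpa using h1
      have hbmem : b ∈ rest.filter (fun x => PySem.Int.mod x 2 == PySem.Int.mod d 2) :=
        (hfil.mem_iff).mpr (by simp)
      obtain ⟨m, hm⟩ : ∃ m, PySem.List.max?
          (rest.filter (fun x => PySem.Int.mod x 2 == PySem.Int.mod d 2)) (fun x => x) = some m := by
        cases h : PySem.List.max?
            (rest.filter (fun x => PySem.Int.mod x 2 == PySem.Int.mod d 2)) (fun x => x) with
        | none =>
          exact absurd ((PySem.List.max?_eq_none_iff _ _).mp h ▸ hbmem) (by simp)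
        | some m => exact ⟨m, rfl⟩
      have hmmem : m ∈ o' ++ [b] := hfil.subset (PySem.List.max?_mem hm)
      have hmle : m ≤ b := by
        rcases List.mem_append.mp hmmem with h | h
        · exact (List.pairwise_append.mp hpo).2.2 m h b (by simp)
        · simp at h; omega
      have hble : b ≤ m := PySem.List.max?_isMax hm b hbmem
      have hmeq : m = b := le_antisymm hmle hble
      subst hmeq
      have hbrest : m ∈ rest := hperm.mem_iff.mpr (by simp)
      have hrm : PySem.List.remove? rest m = some (rest.erase m) :=
        PySem.List.remove?_eq_some_erase rest m hbrest
      have hstep : bStep (rest, v) d = (rest.erase m, v * 10 + m) := by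
        simp only [bStep, hm, hrm]
      rw [hstep, hB]
      have hperm' : (rest.erase m).Perm (o' ++ e) := by
        have h1 : rest.Perm (m :: (o' ++ e)) := by
          refine hperm.trans ?_
          have h0 : (o' ++ [m]) ++ e = o' ++ m :: e := by simp
          rw [h0]
          exact List.perm_middle
        have h2 := h1.erase m
        simpa using h2
      have hpo' : o'.Pairwise (· ≤ ·) := hpo.sublist (by simp)
      have hmo' : ∀ x ∈ o', PySem.Int.mod x 2 = 1 := fun x hx' => hmo x (by simp [hx'])
      have := ih o' e (rest.erase m) (v * 10 + m) hperm' hpo' hpe hmo' hme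
        (by simp [List.length_append] at hcnt ⊢; omega) hcnt'
      rw [this]
      rfl

-- ===== VERDICT (by name: the statement is the Claim_ definition above) =====
theorem largestInteger_spec : Claim_equal_largestInteger := by
  intro num _ _
  unfold Spec_largestInteger largestInteger largestInteger_alt
  set ds : List Int := (PySem.Int.toStr num).toList.map pyDigit with hds
  have hlen : PySem.Str.len (PySem.Int.toStr num) = (ds.length : Int) := by
    rw [PySem.Str.len_eq, hds, List.length_map]
  rw [hlen]
  dsimp only
  rw [PySem.List.foldl_pyRange_zero_pyGetD' ds 0 aStep (_, _, _)]
  rw [aSplit_eq ds [] []]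
  simp only [List.nil_append]
  set odds := PySem.List.sorted (ds.filter (fun i => !decide (PySem.Int.mod i 2 = 0))) (fun x => x) false with hodds
  set evens := PySem.List.sorted (ds.filter (fun i => decide (PySem.Int.mod i 2 = 0))) (fun x => x) false with hevens
  rw [aFold_acc ds odds evens []]
  simp only [List.nil_append]
  have hperm : ds.Perm (odds ++ evens) := by
    have h1 : (ds.filter (fun i => !decide (PySem.Int.mod i 2 = 0)) ++
        ds.filter (fun i => !(!decide (PySem.Int.mod i 2 = 0)))).Perm ds :=
      List.filter_append_perm _ ds
    have h2 : ds.filter (fun i => !(!decide (PySem.Int.mod i 2 = 0))) =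
        ds.filter (fun i => decide (PySem.Int.mod i 2 = 0)) := by
      simp only [Bool.not_not]
    rw [h2] at h1
    exact (h1.symm).trans
      (List.Perm.append (PySem.List.sorted_perm _ _ _).symm (PySem.List.sorted_perm _ _ _).symm)
  have hpo : odds.Pairwise (· ≤ ·) :=
    PySem.List.sorted_pairwise (ds.filter (fun i => !decide (PySem.Int.mod i 2 = 0))) (fun x => x)
  have hpe : evens.Pairwise (· ≤ ·) :=
    PySem.List.sorted_pairwise (ds.filter (fun i => decide (PySem.Int.mod i 2 = 0))) (fun x => x)
  have hmo : ∀ x ∈ odds, PySem.Int.mod x 2 = 1 := by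
    intro x hx
    rw [hodds, PySem.List.mem_sorted] at hx
    have h1 : (!decide (PySem.Int.mod x 2 = 0)) = true := (List.mem_filter.mp hx).2
    rcases mod2_cases x with h | h
    · rw [h] at h1; simp at h1
    · exact h
  have hme : ∀ x ∈ evens, PySem.Int.mod x 2 = 0 := by
    intro x hx
    rw [hevens, PySem.List.mem_sorted] at hx
    exact of_decide_eq_true ((List.mem_filter.mp hx).2)
  have hco : ds.countP (fun d => !decide (PySem.Int.mod d 2 = 0)) ≤ odds.length := by
    rw [hodds, PySem.List.length_sorted, ← List.countP_eq_length_filter]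
  have hce : ds.countP (fun d => decide (PySem.Int.mod d 2 = 0)) ≤ evens.length := by
    rw [hevens, PySem.List.length_sorted, ← List.countP_eq_length_filter]
  rw [main_loop ds odds evens ds 0 hperm hpo hpe hmo hme hco hce]
  exact (powSum_eq_horner _)
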